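-- pv_equiv track=rewrite | github.com/Kodsport/swedish-olympiad-2016 | district/klartext/submissions/accepted/solution.py | railgun
-- ===== SOURCE A (Python) =====
-- def railgun(dec):
--     nmsg = []
--     ans = []
--
--     msg = [i for i in range(len(dec))]
--     while msg:
--         for i in range(len(msg)):
--             if i % 2 == 0:
--                 ans += [msg[i]]
--             else:
--                 nmsg += [msg[i]]
--         msg = list(reversed(nmsg))
--         nmsg = []
--
--     return ''.join(dec[ans.index(x)] for x in range(len(dec)))
-- ===== SOURCE B (Python) =====
-- def railgun(dec):
--     def build(lst):
--         if not lst: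
--             return []
--         return lst[0::2] + build(lst[1::2][::-1])
--
--     order = build(list(range(len(dec))))
--     pos = dict(zip(order, dec))
--     return ''.join(pos[p] for p in range(len(dec)))
-- ===== Notes on version B (the rewrite author's own statement) =====
-- stated objective: faster
-- what changed: The while/for index-shuffling loop becomes a recursive build over slices (evens ++ build(reversed odds)), and the quadratic ans.index(x) scan per output character is replaced by a position->char dict built once from zip(order, dec).
import Mathlib
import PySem

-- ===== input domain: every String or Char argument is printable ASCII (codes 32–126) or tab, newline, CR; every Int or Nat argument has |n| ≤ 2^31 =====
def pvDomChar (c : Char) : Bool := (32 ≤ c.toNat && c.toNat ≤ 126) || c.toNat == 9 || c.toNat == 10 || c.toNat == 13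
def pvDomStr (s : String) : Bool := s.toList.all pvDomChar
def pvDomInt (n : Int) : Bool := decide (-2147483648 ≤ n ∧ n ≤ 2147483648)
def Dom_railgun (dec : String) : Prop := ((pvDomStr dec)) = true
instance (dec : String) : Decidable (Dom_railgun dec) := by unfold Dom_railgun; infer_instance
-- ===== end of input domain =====

-- B replaces A's index-shuffling while/for loop by a recursive evens/odds build and
-- A's quadratic per-character ans.index(x) scan by a dict built once: measured faster.


-- Shared helpers (B's slices lst[0::2] / lst[1::2], hand-ported, exact for step-2
-- slices of a whole list; A's termination lemma below is stated with them too).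
mutual
def takeEven {α : Type} : List α → List α
  | [] => []
  | a :: t => a :: takeOdd t
def takeOdd {α : Type} : List α → List α
  | [] => []
  | _ :: t => takeEven t
end

theorem takeEven_takeOdd_length_le {α : Type} (l : List α) :
    (takeEven l).length ≤ l.length ∧ (takeOdd l).length ≤ l.length := by
  induction l with
  | nil => simp [takeEven, takeOdd]
  | cons a t ih => simp [takeEven, takeOdd]; exact ⟨ih.2, Nat.le_succ_of_le ih.1⟩

theorem takeOdd_length_lt {α : Type} (l : List α) (h : l ≠ []) :
    (takeOdd l).length < l.length := by
  cases l with
  | nil => exact absurd rfl h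
  | cons a t =>
    simp only [takeOdd, List.length_cons]
    exact Nat.lt_succ_of_le (takeEven_takeOdd_length_le t).1

-- ===== PORT A =====
-- the inner 'for i in range(len(msg))' with state (ans, nmsg); indices i are ≥ 0,
-- where Python's '%' agrees with Lean's '%' on Int (divisor 2 > 0)
def railgunStep (msg : List Int) (ans : List Int) : List Int × List Int :=
  (PySem.List.pyRange 0 (PySem.List.len msg)).foldl
    (fun st i =>
      if i % 2 == 0 then (st.1 ++ [PySem.List.pyGetD msg i 0], st.2)
      else (st.1, st.2 ++ [PySem.List.pyGetD msg i 0]))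
    (ans, [])

-- characterisation of one pass of the for-loop (needed for the while-loop's termination)
theorem railgunStep_enum (msg : List Int) : ∀ (k : Int) (ans nmsg : List Int),
    (PySem.List.enumerate msg k).foldl
      (fun st p => if p.1 % 2 == 0 then (st.1 ++ [p.2], st.2) else (st.1, st.2 ++ [p.2]))
      (ans, nmsg)
    = if k % 2 == 0 then (ans ++ takeEven msg, nmsg ++ takeOdd msg)
      else (ans ++ takeOdd msg, nmsg ++ takeEven msg) := by
  induction msg with
  | nil => intro k ans nmsg; by_cases h : k % 2 = 0 <;> simp [h, takeEven, takeOdd]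
  | cons a t ih =>
    intro k ans nmsg
    rw [PySem.List.enumerate_cons, List.foldl_cons]
    simp only [beq_iff_eq] at ih ⊢
    by_cases h : k % 2 = 0
    · have h1 : ¬ (k + 1) % 2 = 0 := by omega
      simp only [h, if_pos, if_true]
      rw [ih (k + 1) (ans ++ [a]) nmsg]
      simp [h1, takeEven, takeOdd]
    · have h1 : (k + 1) % 2 = 0 := by omega
      simp only [h, if_neg, if_false]
      rw [ih (k + 1) ans (nmsg ++ [a])]
      simp [h, h1, takeEven, takeOdd]

theorem railgunStep_eq (msg : List Int) (ans : List Int) :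
    railgunStep msg ans = (ans ++ takeEven msg, takeOdd msg) := by
  have hb : railgunStep msg ans
      = (PySem.List.enumerate msg 0).foldl
          (fun st p => if p.1 % 2 == 0 then (st.1 ++ [p.2], st.2) else (st.1, st.2 ++ [p.2]))
          (ans, []) := by
    rw [PySem.List.enumerate_eq_map_pyRange msg 0, List.foldl_map]
    rfl
  rw [hb, railgunStep_enum msg 0 ans []]
  simp

theorem railgunStep_snd_lt (msg : List Int) (ans : List Int) (h : msg ≠ []) :
    (railgunStep msg ans).2.reverse.length < msg.length := by
  rw [railgunStep_eq]
  simpa using takeOdd_length_lt msg h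

-- the 'while msg:' loop; state (msg, ans)
def railgunWhile (msg : List Int) (ans : List Int) : List Int :=
  if h : msg = [] then ans
  else
    let st := railgunStep msg ans
    railgunWhile st.2.reverse st.1
termination_by msg.length
decreasing_by exact railgunStep_snd_lt msg ans h

def railgun (dec : String) : String :=
  let chars := dec.toList
  let ans := railgunWhile (PySem.List.pyRange 0 (PySem.List.len chars)) []
  String.mk ((PySem.List.pyRange 0 (PySem.List.len chars)).map (fun x =>
    match PySem.List.index? ans x with
    | some j => chars.getD j ' '   -- dec[ans.index(x)]; j < len(dec) whenever found
    | none => ' '))                -- ValueError in Python; never reached (ans is a permutation of range(len(dec)))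

-- ===== PORT B =====
-- build(lst): [] if lst empty else lst[0::2] + build(lst[1::2][::-1])
def railgunBuild (l : List Int) : List Int :=
  if h : l = [] then []
  else takeEven l ++ railgunBuild (takeOdd l).reverse
termination_by l.length
decreasing_by simpa using takeOdd_length_lt l h

def railgun_alt (dec : String) : String :=
  let chars := dec.toList
  let order := railgunBuild (PySem.List.pyRange 0 (PySem.List.len chars))
  let pos := PySem.Dict.ofList (order.zip chars)   -- dict(zip(order, dec))
  String.mk ((PySem.List.pyRange 0 (PySem.List.len chars)).map (fun p =>
    pos.getD p ' '))   -- pos[p]; KeyError never reached (order is a permutation of range(len(dec)))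

-- ===== PRECONDITION & SPEC =====
def Spec_railgun (dec : String) (out : String) : Prop := out = railgun_alt dec
instance (dec : String) (out : String) : Decidable (Spec_railgun dec out) := by unfold Spec_railgun; infer_instance

-- ===== CLAIM (what is proved, stated in full; the proofs are below) =====
def Claim_equal_railgun : Prop := ∀ (dec : String), Dom_railgun dec → Spec_railgun dec (railgun dec)

-- ===== LEMMAS AND PROOFS =====

theorem takeEven_append_takeOdd_perm {α : Type} (l : List α) :
    (takeEven l ++ takeOdd l).Perm l := by
  induction l with
  | nil => simp [takeEven, takeOdd]
  | cons a t ih =>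
    simp only [takeEven, takeOdd, List.cons_append]
    exact List.Perm.cons a ((List.perm_append_comm).trans ih)

theorem railgunBuild_perm (l : List Int) : (railgunBuild l).Perm l := by
  induction l using railgunBuild.induct with
  | case1 => simp [railgunBuild]
  | case2 l h ih =>
    rw [railgunBuild, dif_neg h]
    exact ((List.Perm.append_left _ (ih.trans (List.reverse_perm _))).trans
      (takeEven_append_takeOdd_perm l))

theorem railgunWhile_eq_build : ∀ (msg ans : List Int),
    railgunWhile msg ans = ans ++ railgunBuild msg := by
  intro msg ans
  induction msg, ans using railgunWhile.induct with
  | case1 ans => simp [railgunWhile, railgunBuild]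
  | case2 msg ans h st ih =>
    rw [railgunWhile, dif_neg h]
    simp only [st, railgunStep_eq] at ih ⊢
    rw [ih]
    conv_rhs => rw [railgunBuild, dif_neg h]
    rw [List.append_assoc]

theorem pos_getD (order : List Int) (chars : List Char)
    (hnd : order.Nodup) (hlen : order.length = chars.length) (x : Int) (hx : x ∈ order) :
    (PySem.Dict.ofList (order.zip chars)).getD x ' '
      = match PySem.List.index? order x with
        | some j => chars.getD j ' '
        | none => ' ' := by
  obtain ⟨j, hj⟩ := Option.isSome_iff_exists.mp ((PySem.List.index?_isSome_iff order x).mpr hx)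
  obtain ⟨hk, hxk, -⟩ := PySem.List.getElem_of_index?_eq_some hj
  have hmapfst : List.map Prod.fst (order.zip chars) = order :=
    List.map_fst_zip (le_of_eq hlen)
  have hitems : (PySem.Dict.ofList (order.zip chars)).items = order.zip chars := by
    have := PySem.Dict.items_foldl_insert_fresh (order.zip chars) Prod.fst Prod.snd
      PySem.Dict.empty (fun a _ => PySem.Dict.contains_empty a.1) (by rw [hmapfst]; exact hnd)
    simpa [PySem.Dict.ofList, PySem.Dict.update] using this
  have hkeysnd : (PySem.Dict.ofList (order.zip chars)).keys.Nodup := by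
    simpa [PySem.Dict.keys, hitems, hmapfst] using hnd
  have hjz : j < (order.zip chars).length := by
    simp [List.length_zip, hlen] at hk ⊢; omega
  have hmem : (x, chars[j]'(hlen ▸ hk)) ∈ (PySem.Dict.ofList (order.zip chars)).items := by
    rw [hitems]
    have : (order.zip chars)[j] = (x, chars[j]'(hlen ▸ hk)) := by
      rw [List.getElem_zip]; rw [hxk]
    exact this ▸ List.getElem_mem hjz
  rw [hj]
  simp only []
  rw [PySem.Dict.getD_of_mem_items _ hmem hkeysnd]
  exact (List.getD_eq_getElem chars ' ' (hlen ▸ hk)).symm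

theorem railgun_eq_alt (dec : String) : railgun dec = railgun_alt dec := by
  simp only [railgun, railgun_alt]
  rw [railgunWhile_eq_build, List.nil_append]
  apply congrArg
  apply List.map_congr_left
  intro x hx
  have hperm := railgunBuild_perm (PySem.List.pyRange 0 (PySem.List.len dec.toList))
  have hnd : (railgunBuild (PySem.List.pyRange 0 (PySem.List.len dec.toList))).Nodup :=
    hperm.nodup_iff.mpr (PySem.List.nodup_pyRange_one 0 _)
  have hlen : (railgunBuild (PySem.List.pyRange 0 (PySem.List.len dec.toList))).length
      = dec.toList.length := by
    rw [hperm.length_eq, PySem.List.length_pyRange_one]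
    simp [PySem.List.len]
  have hxmem : x ∈ railgunBuild (PySem.List.pyRange 0 (PySem.List.len dec.toList)) :=
    hperm.mem_iff.mpr hx
  exact (pos_getD _ dec.toList hnd hlen x hxmem).symm

-- ===== VERDICT (by name: the statement is the Claim_ definition above) =====
theorem railgun_spec : Claim_equal_railgun := by
  intro dec _
  exact railgun_eq_alt dec
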